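-- pv_equiv track=rewrite | github.com/cangsheng123/english | Extract_nouns.py | decode_compact_token
-- ===== SOURCE A (Python) =====
-- from typing import Dict, Iterable, List, Sequence, Tuple
--
-- def decode_compact_token(compact: str) -> str:
--     """把形如 d000100o000100 的紧凑编码还原为原单词。"""
--     i = 0
--     chars: List[str] = []
--     while i < len(compact):
--         ch = compact[i]
--         # 数字 token 在编码时可能原样返回
--         if i + 7 > len(compact) or not compact[i + 1:i + 7].isdigit():
--             chars.append(ch)
--             i += 1
--         else:
--             chars.append(ch)
--             i += 7
--     return "".join(chars)
-- ===== SOURCE B (Python) =====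
-- def decode_compact_token(compact: str) -> str:
--     """Decode by splitting into maximal digit / non-digit runs, then emitting each
--     run with closed-form arithmetic (divmod) instead of scanning index by index."""
--     # phase 1: group into maximal runs of (is_digit, characters)
--     runs = []
--     for ch in compact:
--         d = ch.isdigit()
--         if runs and runs[-1][0] == d:
--             runs[-1][1].append(ch)
--         else:
--             runs.append((d, [ch]))
--     # phase 2: per-run closed form
--     out = []
--     for idx, (isdig, chars) in enumerate(runs):
--         seg = "".join(chars)
--         if isdig:
--             # a digit run preceded by a non-digit char loses 6 digits to that char
--             if idx > 0 and len(seg) >= 6: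
--                 seg = seg[6:]
--             q = len(seg) // 7
--             out.append("".join(seg[7 * k] for k in range(q)) + seg[7 * q:])
--         else:
--             out.append(seg)
--     return "".join(out)
-- ===== Notes on version B (the rewrite author's own statement) =====
-- stated objective: faster
-- what changed: B decodes in two phases: it first groups the string into maximal digit/non-digit runs, then emits each run by closed-form arithmetic (a non-digit run is copied verbatim; a digit run, after losing 6 digits to a preceding non-digit char, keeps every 7th digit plus the short tail via divmod), replacing A's per-position advance-by-1-or-7 scan that builds and tests a fresh 6-character slice at each index.
import Mathlib
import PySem

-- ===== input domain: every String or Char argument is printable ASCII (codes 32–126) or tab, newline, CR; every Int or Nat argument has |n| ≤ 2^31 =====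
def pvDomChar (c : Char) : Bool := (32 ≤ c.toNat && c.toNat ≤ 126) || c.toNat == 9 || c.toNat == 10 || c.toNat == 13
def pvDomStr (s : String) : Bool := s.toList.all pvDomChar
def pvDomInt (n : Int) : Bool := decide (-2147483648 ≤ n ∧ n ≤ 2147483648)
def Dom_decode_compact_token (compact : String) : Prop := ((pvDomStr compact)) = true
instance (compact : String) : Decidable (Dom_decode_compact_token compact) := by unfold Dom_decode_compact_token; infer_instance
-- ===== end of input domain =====

-- B decodes via maximal digit/non-digit runs and per-run closed-form arithmetic instead of A's per-index 6-char-slice scan (measured faster in a timing run on its generated inputs).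

-- ===== PORT A =====
-- A's while loop: i advances by 1, or by 7 when the next 6 characters form a digit-only slice
def pvA_go (cs : List Char) (i : Nat) (acc : List Char) : List Char :=
  if h : i < cs.length then
    let ch := cs[i]
    if i + 7 > cs.length || !(PySem.Chars.strIsdigit (PySem.List.slice cs (some ((i : Int) + 1)) (some ((i : Int) + 7)))) then
      pvA_go cs (i + 1) (acc ++ [ch])
    else
      pvA_go cs (i + 7) (acc ++ [ch])
  else acc
termination_by cs.length - i
decreasing_by all_goals omega

def decode_compact_token (compact : String) : String :=
  String.ofList (pvA_go compact.toList 0 [])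

-- ===== PORT B =====
-- B phase 1, loop body: extend the last run or start a new one (runs[-1], append)
def pvRunsStep (runs : List (Bool × List Char)) (ch : Char) : List (Bool × List Char) :=
  let d := PySem.Chars.isdigit ch
  match runs.getLast? with
  | some (b, seg) =>
      if b == d then runs.dropLast ++ [(b, seg ++ [ch])] else runs ++ [(d, [ch])]
  | none => [(d, [ch])]

-- B phase 2: the 'for idx, (isdig, chars) in enumerate(runs)' loop with its accumulator
def pvB_proc : List (Bool × List Char) → Nat → List Char → List Char
  | [], _, out => out
  | (isdig, chars) :: rest, idx, out =>
      pvB_proc rest (idx + 1)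
        (out ++ (if isdig then
            (let seg := if 0 < idx ∧ 6 ≤ chars.length then chars.drop 6 else chars
             ((List.range (seg.length / 7)).map (fun k => seg.getD (7 * k) ' ')) ++
               seg.drop (7 * (seg.length / 7)))
          else chars))

def decode_compact_token_alt (compact : String) : String :=
  String.ofList (pvB_proc (compact.toList.foldl pvRunsStep []) 0 [])

-- ===== PRECONDITION & SPEC =====
def Spec_decode_compact_token (compact : String) (out : String) : Prop := out = decode_compact_token_alt compact
instance (compact : String) (out : String) : Decidable (Spec_decode_compact_token compact out) := by unfold Spec_decode_compact_token; infer_instance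

-- ===== CLAIM (what is proved, stated in full; the proofs are below) =====
def Claim_equal_decode_compact_token : Prop := ∀ (compact : String), Dom_decode_compact_token compact → Spec_decode_compact_token compact (decode_compact_token compact)

-- ===== LEMMAS AND PROOFS =====

-- recursive characterization of the decoding: keep the head, then eat 6 digits when the next 6 chars are digits
def pvDec : List Char → List Char
  | [] => []
  | c :: r =>
      c :: pvDec (if 6 ≤ r.length ∧ (r.take 6).all PySem.Chars.isdigit = true then r.drop 6 else r)
termination_by l => l.length
decreasing_by split <;> simp

-- recursive form of what survives of a maximal digit run
def pvKept (seg : List Char) : List Char :=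
  if 7 ≤ seg.length then seg.take 1 ++ pvKept (seg.drop 7) else seg
termination_by seg.length
decreasing_by simp; omega

-- span-based (front-recursive) characterization of B's grouping fold
def pvGroupL : List Char → List (Bool × List Char)
  | [] => []
  | c :: rest =>
      (PySem.Chars.isdigit c,
        c :: rest.takeWhile (fun x => PySem.Chars.isdigit x == PySem.Chars.isdigit c)) ::
      pvGroupL (rest.dropWhile (fun x => PySem.Chars.isdigit x == PySem.Chars.isdigit c))
termination_by l => l.length
decreasing_by
  have := List.length_dropWhile_le (fun x => PySem.Chars.isdigit x == PySem.Chars.isdigit c) rest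
  simp; omega

def pvFlat (runs : List (Bool × List Char)) : List Char := (runs.map Prod.snd).flatten

-- the head digit run after being eaten by a preceding non-digit char
def pvEat : List (Bool × List Char) → List (Bool × List Char)
  | [] => []
  | (b, seg) :: rest =>
      if b then (b, if 6 ≤ seg.length then seg.drop 6 else seg) :: rest else (b, seg) :: rest

theorem pvFlat_cons (b : Bool) (seg : List Char) (rs : List (Bool × List Char)) :
    pvFlat ((b, seg) :: rs) = seg ++ pvFlat rs := by
  simp [pvFlat]

theorem pvAcond (cs : List Char) (i : Nat) (h : i < cs.length) :
    ((i + 7 > cs.length : Bool)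
        || !(PySem.Chars.strIsdigit (PySem.List.slice cs (some ((i : Int) + 1)) (some ((i : Int) + 7))))) = true
      ↔ ¬ (6 ≤ (cs.drop (i + 1)).length ∧ ((cs.drop (i + 1)).take 6).all PySem.Chars.isdigit = true) := by
  have hsl : PySem.List.slice cs (some ((i : Int) + 1)) (some ((i : Int) + 7)) = (cs.drop (i + 1)).take 6 := by
    have h1 : ((i : Int) + 1) = ((i + 1 : Nat) : Int) := by push_cast; ring
    have h7 : ((i : Int) + 7) = ((i + 7 : Nat) : Int) := by push_cast; ring
    rw [h1, h7, PySem.List.slice_natCast]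
    congr 1
    omega
  rw [hsl]
  constructor
  · intro hb
    rintro ⟨h6, hall⟩
    have hlen : i + 7 ≤ cs.length := by rw [List.length_drop] at h6; omega
    have htk : ((cs.drop (i + 1)).take 6).length = 6 := by
      simp [List.length_take, List.length_drop]
      omega
    have hne : ((cs.drop (i + 1)).take 6).isEmpty = false := by
      rw [List.isEmpty_eq_false_iff_exists_mem]
      obtain ⟨x, hx⟩ := List.exists_mem_of_length_pos (l := (cs.drop (i + 1)).take 6) (by omega)
      exact ⟨x, hx⟩
    have hd : (decide (i + 7 > cs.length)) = false := by simp; omega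
    rw [hd, Bool.false_or, Bool.not_eq_true'] at hb
    simp only [PySem.Chars.strIsdigit, hne, Bool.not_false, Bool.true_and] at hb
    rw [hall] at hb
    simp at hb
  · intro hnand
    by_cases hgt : i + 7 > cs.length
    · simp [hgt]
    · have h6 : 6 ≤ (cs.drop (i + 1)).length := by rw [List.length_drop]; omega
      have hallf : ((cs.drop (i + 1)).take 6).all PySem.Chars.isdigit = false := by
        cases hc : ((cs.drop (i + 1)).take 6).all PySem.Chars.isdigit with
        | true => exact absurd ⟨h6, hc⟩ hnand
        | false => rfl
      simp [PySem.Chars.strIsdigit, hallf]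

theorem pvA_dec (cs : List Char) (i : Nat) (acc : List Char) :
    pvA_go cs i acc = acc ++ pvDec (cs.drop i) := by
  induction i, acc using pvA_go.induct cs with
  | case1 i acc h ch hc ih =>
      rw [pvA_go]
      simp only [dif_pos h, if_pos hc]
      rw [ih, List.drop_eq_getElem_cons h, pvDec,
        if_neg ((pvAcond cs i h).mp hc), List.append_assoc]
      rfl
  | case2 i acc h ch hc ih =>
      rw [pvA_go]
      simp only [dif_pos h, if_neg hc]
      have hcond : 6 ≤ (cs.drop (i + 1)).length ∧ ((cs.drop (i + 1)).take 6).all PySem.Chars.isdigit = true := by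
        by_contra hcc
        rw [← pvAcond cs i h] at hcc
        exact hc hcc
      rw [ih, List.drop_eq_getElem_cons h, pvDec, if_pos hcond, List.drop_drop, List.append_assoc]
      rfl
  | case3 i acc h =>
      rw [pvA_go, List.drop_of_length_le (by omega)]
      simp [h, pvDec]

theorem pvStep_ne_nil (runs : List (Bool × List Char)) (ch : Char) : pvRunsStep runs ch ≠ [] := by
  unfold pvRunsStep
  cases h : runs.getLast? with
  | none => simp
  | some x => cases x; simp; split <;> simp

theorem pvRunsStep_some (runs : List (Bool × List Char)) (ch : Char) (b : Bool) (seg : List Char)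
    (h : runs.getLast? = some (b, seg)) :
    pvRunsStep runs ch
      = if b == PySem.Chars.isdigit ch then runs.dropLast ++ [(b, seg ++ [ch])]
        else runs ++ [(PySem.Chars.isdigit ch, [ch])] := by
  unfold pvRunsStep
  rw [h]

theorem pvStep_context (front tl : List (Bool × List Char)) (ch : Char) (h : tl ≠ []) :
    pvRunsStep (front ++ tl) ch = front ++ pvRunsStep tl ch := by
  obtain ⟨b, seg, hx⟩ : ∃ b seg, tl.getLast? = some (b, seg) := by
    obtain ⟨x, hx⟩ := List.getLast?_isSome.mpr h |> Option.isSome_iff_exists.mp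
    exact ⟨x.1, x.2, by rw [hx]⟩
  have hx2 : (front ++ tl).getLast? = some (b, seg) := by
    rw [List.getLast?_append, hx, Option.some_or]
  rw [pvRunsStep_some _ ch b seg hx2, pvRunsStep_some _ ch b seg hx]
  have hde : tl.isEmpty = false := by simp [h]
  split
  · rw [List.dropLast_append, hde]
    simp [List.append_assoc]
  · simp [List.append_assoc]

theorem pvFoldl_context (cs : List Char) (front tl : List (Bool × List Char)) (h : tl ≠ []) :
    cs.foldl pvRunsStep (front ++ tl) = front ++ cs.foldl pvRunsStep tl := by
  induction cs generalizing tl with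
  | nil => simp
  | cons c cs ih =>
      simp only [List.foldl_cons]
      rw [pvStep_context front tl c h, ih (pvRunsStep tl c) (pvStep_ne_nil tl c)]

theorem pvFoldl_single (cs : List Char) :
    ∀ (b : Bool) (seg : List Char),
      cs.foldl pvRunsStep [(b, seg)]
        = (b, seg ++ cs.takeWhile (fun x => PySem.Chars.isdigit x == b))
            :: pvGroupL (cs.dropWhile (fun x => PySem.Chars.isdigit x == b)) := by
  induction cs with
  | nil => intro b seg; simp [pvGroupL]
  | cons c cs ih =>
      intro b seg
      simp only [List.foldl_cons]
      have hstep : pvRunsStep [(b, seg)] c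
          = if b == PySem.Chars.isdigit c then [(b, seg ++ [c])]
            else [(b, seg), (PySem.Chars.isdigit c, [c])] := by
        rw [pvRunsStep_some [(b, seg)] c b seg (by simp)]
        split <;> simp
      rw [hstep]
      cases hbd : (b == PySem.Chars.isdigit c) with
      | true =>
          rw [if_pos rfl] -- after cases the condition is literal true
          rw [ih b (seg ++ [c])]
          have hb : PySem.Chars.isdigit c = b := (beq_iff_eq.mp hbd).symm
          rw [List.takeWhile_cons, List.dropWhile_cons]
          simp [hb, List.append_assoc]
      | false =>
          rw [if_neg (by simp)]
          have : [(b, seg), (PySem.Chars.isdigit c, [c])]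
              = [(b, seg)] ++ [(PySem.Chars.isdigit c, [c])] := rfl
          rw [this, pvFoldl_context cs [(b, seg)] _ (by simp), ih (PySem.Chars.isdigit c) [c]]
          have hb : ¬ (PySem.Chars.isdigit c == b) = true := by
            simp only [beq_iff_eq]
            intro e
            rw [e] at hbd
            simp at hbd
          rw [List.takeWhile_cons, List.dropWhile_cons]
          simp only [hb]
          conv_rhs => rw [pvGroupL.eq_def]
          simp

theorem pvRuns_eq_groupL (cs : List Char) : cs.foldl pvRunsStep [] = pvGroupL cs := by
  cases cs with
  | nil => simp [pvGroupL]
  | cons c cs =>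
      simp only [List.foldl_cons]
      have h0 : pvRunsStep [] c = [(PySem.Chars.isdigit c, [c])] := by unfold pvRunsStep; simp
      rw [h0, pvFoldl_single cs (PySem.Chars.isdigit c) [c], pvGroupL]
      simp

theorem pvHead_dropWhile {α : Type} (p : α → Bool) (l : List α) (x : α)
    (h : (l.dropWhile p).head? = some x) : p x = false := by
  have := List.head?_dropWhile_not p l
  rw [h] at this
  exact this

theorem pvFlat_groupL (l : List Char) : pvFlat (pvGroupL l) = l := by
  induction l using pvGroupL.induct with
  | case1 => simp [pvGroupL, pvFlat]
  | case2 c rest ih =>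
      rw [pvGroupL]
      simp only [pvFlat, List.map_cons, List.flatten_cons] at ih ⊢
      rw [ih]
      simp [List.takeWhile_append_dropWhile]

theorem pvCondIff (seg tail : List Char) (hseg : ∀ c ∈ seg, PySem.Chars.isdigit c = true)
    (htail : ∀ c ∈ tail.head?, PySem.Chars.isdigit c = false) :
    (6 ≤ (seg ++ tail).length ∧ ((seg ++ tail).take 6).all PySem.Chars.isdigit = true) ↔ 6 ≤ seg.length := by
  constructor
  · rintro ⟨hlen, hall⟩
    by_contra hlt
    rw [not_le] at hlt
    have htne : tail ≠ [] := by
      intro e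
      subst e
      simp at hlen
      omega
    obtain ⟨c0, t, rfl⟩ := List.exists_cons_of_ne_nil htne
    have hc0 : PySem.Chars.isdigit c0 = false := htail c0 (by simp)
    rw [List.take_append, List.take_of_length_le (by omega)] at hall
    have h6 : 6 - seg.length = (6 - seg.length - 1) + 1 := by omega
    rw [h6, List.take_succ_cons, List.all_append] at hall
    simp at hall
    rw [hall.2.1] at hc0
    exact Bool.true_eq_false.mp hc0
  · intro h
    refine ⟨by simp; omega, ?_⟩
    rw [List.take_append_of_le_length h, List.all_eq_true]
    intro x hx
    exact hseg x (List.mem_of_mem_take hx)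

theorem pvDec_nd (seg tail : List Char) (hne : seg ≠ [])
    (h : ∀ c ∈ seg, PySem.Chars.isdigit c = false) :
    pvDec (seg ++ tail)
      = seg ++ pvDec (if 6 ≤ tail.length ∧ (tail.take 6).all PySem.Chars.isdigit = true then tail.drop 6 else tail) := by
  induction seg with
  | nil => exact absurd rfl hne
  | cons c s ih =>
      cases s with
      | nil => rw [List.cons_append, List.nil_append, pvDec]; rfl
      | cons c2 s2 =>
          have hc2 : PySem.Chars.isdigit c2 = false := h c2 (by simp)
          rw [List.cons_append, pvDec]
          have hcond : ¬ (6 ≤ ((c2 :: s2) ++ tail).length ∧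
              (((c2 :: s2) ++ tail).take 6).all PySem.Chars.isdigit = true) := by
            rintro ⟨-, hall⟩
            rw [List.cons_append, List.take_succ_cons, List.all_cons, hc2] at hall
            simp at hall
          rw [if_neg hcond, ih (by simp) (fun x hx => h x (by simp [hx]))]
          rfl

theorem pvDec_d_small (tail : List Char) (htail : ∀ c ∈ tail.head?, PySem.Chars.isdigit c = false) :
    ∀ seg : List Char, seg.length ≤ 6 → (∀ c ∈ seg, PySem.Chars.isdigit c = true) →
      pvDec (seg ++ tail) = seg ++ pvDec tail := by
  intro seg
  induction seg with
  | nil => simp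
  | cons c s ih =>
      intro hlen hdig
      have hs : ∀ x ∈ s, PySem.Chars.isdigit x = true := fun x hx => hdig x (by simp [hx])
      have hcond : ¬ (6 ≤ (s ++ tail).length ∧ ((s ++ tail).take 6).all PySem.Chars.isdigit = true) := by
        rw [pvCondIff s tail hs htail]
        simp at hlen
        omega
      rw [List.cons_append, pvDec, if_neg hcond, ih (by simp at hlen; omega) hs]
      rfl

theorem pvDec_d (seg tail : List Char) (hseg : ∀ c ∈ seg, PySem.Chars.isdigit c = true)
    (htail : ∀ c ∈ tail.head?, PySem.Chars.isdigit c = false) :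
    pvDec (seg ++ tail) = pvKept seg ++ pvDec tail := by
  induction seg using pvKept.induct with
  | case1 seg h7 ih =>
      obtain ⟨c, s, rfl⟩ := List.exists_cons_of_ne_nil (l := seg) (by intro e; rw [e] at h7; simp at h7)
      have hs : ∀ x ∈ s, PySem.Chars.isdigit x = true := fun x hx => hseg x (by simp [hx])
      have h6 : 6 ≤ s.length := by simp at h7; omega
      have hcond : 6 ≤ (s ++ tail).length ∧ ((s ++ tail).take 6).all PySem.Chars.isdigit = true :=
        (pvCondIff s tail hs htail).mpr h6
      rw [List.cons_append, pvDec, if_pos hcond, List.drop_append_of_le_length h6]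
      have hd7 : (c :: s).drop 7 = s.drop 6 := by simp
      rw [hd7] at ih
      rw [ih (fun x hx => hs x (List.mem_of_mem_drop hx))]
      conv_rhs => rw [pvKept]
      rw [if_pos h7, hd7]
      rfl
  | case2 seg h7 =>
      rw [pvKept, if_neg h7]
      exact pvDec_d_small tail htail seg (by omega) hseg


theorem pvKept_formula (seg : List Char) :
    pvKept seg
      = ((List.range (seg.length / 7)).map (fun k => seg.getD (7 * k) ' ')) ++ seg.drop (7 * (seg.length / 7)) := by
  induction seg using pvKept.induct with
  | case1 seg h7 ih =>
      obtain ⟨c, s, rfl⟩ := List.exists_cons_of_ne_nil (l := seg) (by intro e; rw [e] at h7; simp at h7)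
      have hq : (c :: s).length / 7 = ((c :: s).drop 7).length / 7 + 1 := by
        simp [List.length_drop] at h7 ⊢
        omega
      rw [pvKept, if_pos h7, ih, hq, List.range_succ_eq_map, List.map_cons, List.map_map]
      have hd : 7 * (((c :: s).drop 7).length / 7 + 1) = 7 + 7 * (((c :: s).drop 7).length / 7) := by ring
      rw [hd, ← List.drop_drop]
      have hmap : List.map ((fun k => (c :: s).getD (7 * k) ' ') ∘ Nat.succ) (List.range (((c :: s).drop 7).length / 7))
          = List.map (fun k => ((c :: s).drop 7).getD (7 * k) ' ') (List.range (((c :: s).drop 7).length / 7)) := by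
        apply List.map_congr_left
        intro k _
        have h1 : 7 * Nat.succ k = 7 + 7 * k := by omega
        simp only [Function.comp_apply, List.getD_eq_getElem?_getD, List.getElem?_drop, h1]
      rw [hmap]
      rfl
  | case2 seg h7 =>
      rw [pvKept, if_neg h7, Nat.div_eq_of_lt (by omega)]
      simp

theorem pvTw_all (b : Bool) (rest : List Char) :
    ∀ x ∈ rest.takeWhile (fun x => PySem.Chars.isdigit x == b), PySem.Chars.isdigit x = b := by
  intro x hx
  have := List.mem_takeWhile_imp (p := fun x => PySem.Chars.isdigit x == b) hx
  exact beq_iff_eq.mp this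

theorem pvDw_head (b : Bool) (rest : List Char) :
    ∀ x ∈ (rest.dropWhile (fun x => PySem.Chars.isdigit x == b)).head?,
      PySem.Chars.isdigit x = !b := by
  intro x hx
  have := pvHead_dropWhile (fun x => PySem.Chars.isdigit x == b) rest x hx
  simp at this
  cases b <;> simp [this]

theorem pvEat_of_head_not_digit (l : List Char)
    (h : ∀ x ∈ l.head?, PySem.Chars.isdigit x = false) :
    pvEat (pvGroupL l) = pvGroupL l := by
  cases l with
  | nil => simp [pvGroupL, pvEat]
  | cons c rest =>
      have hc : PySem.Chars.isdigit c = false := by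
        have := h c (by simp)
        exact this
      rw [pvGroupL, hc]
      simp [pvEat]

theorem pvBridge (l : List Char) :
    pvDec (if 6 ≤ l.length ∧ (l.take 6).all PySem.Chars.isdigit = true then l.drop 6 else l)
      = pvDec (pvFlat (pvEat (pvGroupL l))) := by
  cases l with
  | nil => simp [pvGroupL, pvEat, pvFlat]
  | cons c rest =>
      cases hd : PySem.Chars.isdigit c with
      | false =>
          have hcond : ¬ (6 ≤ (c :: rest).length ∧ ((c :: rest).take 6).all PySem.Chars.isdigit = true) := by
            rintro ⟨-, hall⟩
            rw [List.take_succ_cons, List.all_cons, hd] at hall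
            simp at hall
          rw [if_neg hcond,
            pvEat_of_head_not_digit _ (by intro x hx; simp at hx; rw [← hx]; exact hd),
            pvFlat_groupL]
      | true =>
          rw [pvGroupL, hd]
          have hsplit : c :: rest
              = (c :: rest.takeWhile (fun x => PySem.Chars.isdigit x == true))
                ++ rest.dropWhile (fun x => PySem.Chars.isdigit x == true) := by
            simp [List.takeWhile_append_dropWhile]
          have hseg : ∀ x ∈ c :: rest.takeWhile (fun x => PySem.Chars.isdigit x == true),
              PySem.Chars.isdigit x = true := by
            intro x hx
            rcases List.mem_cons.mp hx with h | h
            · rw [h]; exact hd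
            · exact pvTw_all true rest x h
          have htl : ∀ x ∈ (rest.dropWhile (fun x => PySem.Chars.isdigit x == true)).head?,
              PySem.Chars.isdigit x = false := by
            intro x hx
            exact pvDw_head true rest x hx
          have hcond := pvCondIff _ _ hseg htl
          simp only [pvEat, if_true]
          by_cases h6 : 6 ≤ (c :: rest.takeWhile (fun x => PySem.Chars.isdigit x == true)).length
          · conv_lhs => rw [hsplit]
            rw [if_pos (hcond.mpr h6), if_pos h6, pvFlat_cons, pvFlat_groupL,
              List.drop_append_of_le_length h6]
          · conv_lhs => rw [hsplit]
            rw [if_neg (fun hh => h6 (hcond.mp hh)), if_neg h6, pvFlat_cons, pvFlat_groupL]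

theorem pvSeg_all (b : Bool) (c : Char) (rest : List Char) (hd : PySem.Chars.isdigit c = b) :
    ∀ x ∈ c :: rest.takeWhile (fun x => PySem.Chars.isdigit x == b), PySem.Chars.isdigit x = b := by
  intro x hx
  rcases List.mem_cons.mp hx with h | h
  · rw [h]; exact hd
  · exact pvTw_all b rest x h

theorem pvS (l : List Char) :
    ∀ (idx : Nat) (out : List Char), 1 ≤ idx →
      pvB_proc (pvGroupL l) idx out = out ++ pvDec (pvFlat (pvEat (pvGroupL l))) := by
  induction l using pvGroupL.induct with
  | case1 =>
      intro idx out _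
      simp [pvGroupL, pvB_proc, pvEat, pvFlat, pvDec]
  | case2 c rest ih =>
      intro idx out hidx
      cases hd : PySem.Chars.isdigit c with
      | false =>
          rw [hd] at ih
          rw [pvGroupL, hd]
          simp only [pvB_proc, Bool.false_eq_true, if_false]
          rw [ih (idx + 1) _ (by omega)]
          have hEat : pvEat ((false, c :: rest.takeWhile (fun x => PySem.Chars.isdigit x == false))
              :: pvGroupL (rest.dropWhile (fun x => PySem.Chars.isdigit x == false)))
              = (false, c :: rest.takeWhile (fun x => PySem.Chars.isdigit x == false))
              :: pvGroupL (rest.dropWhile (fun x => PySem.Chars.isdigit x == false)) := by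
            simp [pvEat]
          rw [hEat, pvFlat_cons, pvFlat_groupL,
            pvDec_nd _ _ (by simp) (pvSeg_all false c rest hd), pvBridge, List.append_assoc]
      | true =>
          rw [hd] at ih
          rw [pvGroupL, hd]
          simp only [pvB_proc, if_true]
          have hhead : ∀ x ∈ (rest.dropWhile (fun x => PySem.Chars.isdigit x == true)).head?,
              PySem.Chars.isdigit x = false := fun x hx => pvDw_head true rest x hx
          have heat : pvEat (pvGroupL (rest.dropWhile (fun x => PySem.Chars.isdigit x == true)))
              = pvGroupL (rest.dropWhile (fun x => PySem.Chars.isdigit x == true)) :=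
            pvEat_of_head_not_digit _ hhead
          rw [heat] at ih
          set seg := c :: rest.takeWhile (fun x => PySem.Chars.isdigit x == true) with hseg
          by_cases h6 : 6 ≤ seg.length
          · rw [if_pos ⟨by omega, h6⟩, ih (idx + 1) _ (by omega), pvFlat_groupL]
            simp only [pvEat, if_true, if_pos h6]
            rw [pvFlat_cons, pvFlat_groupL,
              pvDec_d (seg.drop 6) _
                (fun x hx => pvSeg_all true c rest hd x (List.mem_of_mem_drop hx)) hhead,
              pvKept_formula, List.append_assoc]
          · rw [if_neg (by rintro ⟨-, hh⟩; exact h6 hh), ih (idx + 1) _ (by omega), pvFlat_groupL]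
            simp only [pvEat, if_true, if_neg h6]
            rw [pvFlat_cons, pvFlat_groupL,
              pvDec_d seg _ (pvSeg_all true c rest hd) hhead, pvKept_formula, List.append_assoc]

theorem pvTop (l : List Char) : pvB_proc (pvGroupL l) 0 [] = pvDec l := by
  cases l with
  | nil => simp [pvGroupL, pvB_proc, pvDec]
  | cons c rest =>
      cases hd : PySem.Chars.isdigit c with
      | false =>
          rw [pvGroupL, hd]
          simp only [pvB_proc, Bool.false_eq_true, if_false]
          rw [pvS _ 1 _ (by omega), List.nil_append]
          rw [← pvBridge, ← pvDec_nd _ _ (by simp) (pvSeg_all false c rest hd)]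
          congr 1
          simp [List.takeWhile_append_dropWhile]
      | true =>
          rw [pvGroupL, hd]
          simp only [pvB_proc, if_true, Nat.lt_irrefl, false_and, if_false, List.nil_append]
          rw [pvS _ 1 _ (by omega)]
          have hhead : ∀ x ∈ (rest.dropWhile (fun x => PySem.Chars.isdigit x == true)).head?,
              PySem.Chars.isdigit x = false := fun x hx => pvDw_head true rest x hx
          rw [pvEat_of_head_not_digit _ hhead, pvFlat_groupL, ← pvKept_formula,
            ← pvDec_d _ _ (pvSeg_all true c rest hd) hhead]
          congr 1
          simp [List.takeWhile_append_dropWhile]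

-- ===== VERDICT (by name: the statement is the Claim_ definition above) =====
theorem decode_compact_token_spec : Claim_equal_decode_compact_token := by
  intro compact _
  unfold Spec_decode_compact_token decode_compact_token decode_compact_token_alt
  rw [pvA_dec, pvRuns_eq_groupL, pvTop, List.drop_zero, List.nil_append]
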